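-- pv_equiv track=rewrite | github.com/arturgesiarz/Graph_Algorithms | lab01/ex1_bfs_dfs.py | dfs
-- ===== SOURCE A (Python) =====
-- def dfs(G,min_value,start,end):
--     n = len(G)
--     visited = [False for _ in range(n)]
--     def DFS_visit(G,x):
--         visited[x]=True
--         for i in range(len(G[x])): #I want to search all my neighbors
--             neigh=G[x][i][0]
--             costs=G[x][i][1]
--             if visited[neigh]==False and costs>=min_value: #condition enabling following edges that are greater or equal
--                 DFS_visit(G,neigh)
--     DFS_visit(G,start)
--     return visited[end]
-- ===== SOURCE B (Python) =====
-- def dfs(G, min_value, start, end):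
--     n = len(G)
--     visited = [False] * n
--     stack = [start]
--     while stack:
--         x = stack.pop()
--         if visited[x]:
--             continue
--         visited[x] = True
--         for e in reversed(G[x]):
--             if not visited[e[0]] and e[1] >= min_value:
--                 stack.append(e[0])
--     return visited[end]
-- ===== Notes on version B (the rewrite author's own statement) =====
-- stated objective: alternative
-- what changed: The recursive DFS with a mutated closure variable is replaced by an iterative worklist loop with an explicit stack (pop a node, skip if visited, mark it and push its admissible unvisited neighbours); only the final visited set matters, so the changed traversal order is safe.
import Mathlib
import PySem

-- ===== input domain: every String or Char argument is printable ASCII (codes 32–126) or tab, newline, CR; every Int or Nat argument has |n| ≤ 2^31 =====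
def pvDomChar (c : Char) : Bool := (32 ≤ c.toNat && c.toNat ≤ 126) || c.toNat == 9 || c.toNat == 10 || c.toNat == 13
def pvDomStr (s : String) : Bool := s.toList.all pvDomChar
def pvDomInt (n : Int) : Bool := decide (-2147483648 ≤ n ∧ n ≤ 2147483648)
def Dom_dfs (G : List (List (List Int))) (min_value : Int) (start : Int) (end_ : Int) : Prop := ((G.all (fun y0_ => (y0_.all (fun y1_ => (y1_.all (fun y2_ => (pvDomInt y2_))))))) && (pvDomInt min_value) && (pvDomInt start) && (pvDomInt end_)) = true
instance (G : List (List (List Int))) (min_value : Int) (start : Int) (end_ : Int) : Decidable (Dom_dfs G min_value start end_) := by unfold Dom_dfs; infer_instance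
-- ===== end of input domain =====

-- B replaces A's recursive DFS (closure-mutated visited array) by an iterative worklist loop with
-- an explicit stack; only the final visited set matters, so the changed traversal order is safe.

-- ===== PORT A =====
-- shared accessors: e[0] and e[1] of an edge (PySem.List.pyGet?; the default is only reached
-- where the Python raises IndexError, which Pre_dfs excludes)
def pvNeigh (e : List Int) : Int := (PySem.List.pyGet? e 0).getD 0
def pvCost (e : List Int) : Int := (PySem.List.pyGet? e 1).getD 0

mutual
-- DFS_visit: mark x, then walk the edge list of x (the fuel only totalizes the recursion;
-- n+1 is enough, proved below)
def dfsVisitA (G : List (List (List Int))) (mv : Int) : Nat → List Bool → Int → List Bool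
  | 0, vis, _ => vis
  | fuel+1, vis, x =>
      dfsEdgesA G mv fuel ((PySem.List.pyGet? G x).getD []) (PySem.List.pySetD vis x true)
  termination_by fuel _ _ => (fuel, 0)
-- the `for i in range(len(G[x]))` loop of DFS_visit
def dfsEdgesA (G : List (List (List Int))) (mv : Int) : Nat → List (List Int) → List Bool → List Bool
  | _, [], vis => vis
  | fuel, e :: rest, vis =>
      dfsEdgesA G mv fuel rest
        (if PySem.List.pyGetD vis (pvNeigh e) true = false ∧ pvCost e ≥ mv
         then dfsVisitA G mv fuel vis (pvNeigh e) else vis)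
  termination_by fuel es _ => (fuel, es.length + 1)
end

def dfs (G : List (List (List Int))) (min_value : Int) (start : Int) (end_ : Int) : Bool :=
  let n := G.length
  let visited := List.replicate n false
  let visited := dfsVisitA G min_value (n + 1) visited start
  PySem.List.pyGetD visited end_ false

-- ===== PORT B =====
-- the normalized (Python) index, and the termination lemmas the worklist loop cites
def pvNrm (n : Nat) (i : Int) : Nat := if 0 ≤ i then i.toNat else n - (-i).toNat

theorem pyIdx?_inrange (n : Nat) (i : Int) (h : PySem.Raise.InRange n i) :
    PySem.List.pyIdx? n i = some (pvNrm n i) := by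
  unfold PySem.Raise.InRange at h
  unfold PySem.List.pyIdx? pvNrm
  split_ifs <;> first | rfl | omega

theorem pvNrm_lt (n : Nat) (i : Int) (h : PySem.Raise.InRange n i) : pvNrm n i < n := by
  unfold PySem.Raise.InRange at h
  unfold pvNrm
  split_ifs <;> omega

theorem pyGet?_inrange {α : Type} (xs : List α) (i : Int) (h : PySem.Raise.InRange xs.length i) :
    PySem.List.pyGet? xs i = xs[pvNrm xs.length i]? := by
  simp [PySem.List.pyGet?, pyIdx?_inrange _ _ h]

theorem pyGetD_inrange {α : Type} (xs : List α) (i : Int) (d : α)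
    (h : PySem.Raise.InRange xs.length i) :
    PySem.List.pyGetD xs i d = xs.getD (pvNrm xs.length i) d := by
  simp [PySem.List.pyGetD, pyGet?_inrange _ _ h, List.getD_eq_getElem?_getD]

theorem pySetD_inrange {α : Type} (xs : List α) (i : Int) (v : α)
    (h : PySem.Raise.InRange xs.length i) :
    PySem.List.pySetD xs i v = xs.set (pvNrm xs.length i) v := by
  simp [PySem.List.pySetD, PySem.List.pySet?, pyIdx?_inrange _ _ h]

theorem pyGetD_false_inrange (vis : List Bool) (i : Int)
    (h : PySem.List.pyGetD vis i true = false) : PySem.Raise.InRange vis.length i := by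
  by_contra hc
  rw [PySem.List.pyGetD, (PySem.List.pyGet?_eq_none_iff _ _).2 hc] at h
  simp at h

theorem count_false_set_lt : ∀ (l : List Bool) (k : Nat) (hk : k < l.length),
    l[k] = false → (l.set k true).count false < l.count false := by
  intro l
  induction l with
  | nil => intro k hk; simp at hk
  | cons a t ih =>
    intro k hk hf
    cases k with
    | zero => simp_all
    | succ k =>
      simp only [List.set_cons_succ, List.count_cons]
      have := ih k (by simpa using hk) (by simpa using hf)
      omega

theorem countFalse_pySetD_lt (vis : List Bool) (x : Int)
    (h : PySem.List.pyGetD vis x true = false) :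
    (PySem.List.pySetD vis x true).count false < vis.count false := by
  have hin := pyGetD_false_inrange vis x h
  have hk := pvNrm_lt vis.length x hin
  rw [pySetD_inrange _ _ _ hin]
  apply count_false_set_lt _ _ hk
  rw [pyGetD_inrange _ _ _ hin, List.getD_eq_getElem _ _ hk] at h
  exact h

-- the worklist loop of B: pop a node, skip it if visited, else mark it and push its
-- admissible unvisited neighbours (the edge list is walked in reverse, as in Source B)
def dfsLoopB (G : List (List (List Int))) (mv : Int) (vis : List Bool) (stack : List Int) :
    List Bool :=
  match stack with
  | [] => vis
  | x :: rest =>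
    if h : PySem.List.pyGetD vis x true = true then
      dfsLoopB G mv vis rest
    else
      let vis' := PySem.List.pySetD vis x true
      dfsLoopB G mv vis'
        (((PySem.List.pyGet? G x).getD []).reverse.foldl
          (fun st e => if PySem.List.pyGetD vis' (pvNeigh e) true = false ∧ pvCost e ≥ mv
                       then pvNeigh e :: st else st) rest)
  termination_by (vis.count false, stack.length)
  decreasing_by
  · apply Prod.Lex.right; simp
  · apply Prod.Lex.left
    exact countFalse_pySetD_lt vis x (by simpa using h)

def dfs_alt (G : List (List (List Int))) (min_value : Int) (start : Int) (end_ : Int) : Bool :=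
  let n := G.length
  let visited := List.replicate n false
  let visited := dfsLoopB G min_value visited [start]
  PySem.List.pyGetD visited end_ false

-- ===== PRECONDITION & SPEC =====
-- A raises IndexError iff start or end is outside the Python index range of `visited`, or the
-- traversal reaches a node one of whose edge entries has fewer than two elements or an edge head
-- that is not a valid node index (A examines every edge of every node it visits).  So Pre_dfs
-- requires: start and end in range, and every node in the closure of {start} under admissible
-- well-formed edges (cost >= min_value) to have only well-formed edges.  pvReachList computes
-- that closure declaratively (saturation of a neighbour step, proved correct below).
def pvEdgeOK (G : List (List (List Int))) (mv : Int) (e : List Int) : Bool :=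
  decide (2 ≤ e.length) && decide (PySem.Raise.InRange G.length (e.headD 0)) &&
    decide (pvCost e ≥ mv)

def pvSuccsW (G : List (List (List Int))) (mv : Int) (k : Nat) : List Nat :=
  ((G[k]?.getD []).filter (pvEdgeOK G mv)).map (fun e => pvNrm G.length (pvNeigh e))

def pvGrow (G : List (List (List Int))) (mv : Int) (S : List Nat) : List Nat :=
  (S ++ S.flatMap (pvSuccsW G mv)).dedup

def pvReachList (G : List (List (List Int))) (mv : Int) (start : Int) : List Nat :=
  (pvGrow G mv)^[G.length] [pvNrm G.length start]

def Pre_dfs (G : List (List (List Int))) (min_value : Int) (start : Int) (end_ : Int) : Prop :=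
  PySem.Raise.InRange G.length start ∧ PySem.Raise.InRange G.length end_ ∧
  ∀ k ∈ pvReachList G min_value start, ∀ e ∈ G[k]?.getD [],
    2 ≤ e.length ∧ PySem.Raise.InRange G.length (e.headD 0)
instance (G : List (List (List Int))) (min_value : Int) (start : Int) (end_ : Int) :
    Decidable (Pre_dfs G min_value start end_) := by unfold Pre_dfs; infer_instance

def pvWitness_dfs : List (List (List Int)) × Int × Int × Int := ([[[1, 5]], []], 0, 0, 1)

def Spec_dfs (G : List (List (List Int))) (min_value : Int) (start : Int) (end_ : Int) (out : Bool) : Prop := out = dfs_alt G min_value start end_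
instance (G : List (List (List Int))) (min_value : Int) (start : Int) (end_ : Int) (out : Bool) : Decidable (Spec_dfs G min_value start end_ out) := by unfold Spec_dfs; infer_instance

-- ===== CLAIM (what is proved, stated in full; the proofs are below) =====
def Claim_equal_dfs : Prop := ∀ (G : List (List (List Int))) (min_value : Int) (start : Int) (end_ : Int), Dom_dfs G min_value start end_ → Pre_dfs G min_value start end_ → Spec_dfs G min_value start end_ (dfs G min_value start end_)

-- ===== LEMMAS AND PROOFS =====
-- Both proofs characterize the final visited array as {k | k reachable from start along edges of
-- cost ≥ min_value}: each run is shown monotone, marking its sources, bounded above by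
-- reachability, and closed under admissible edge steps out of newly marked nodes.

-- one admissible edge step between (normalized) node indices
def pvStep (G : List (List (List Int))) (mv : Int) (k j : Nat) : Prop :=
  ∃ e ∈ (G[k]?.getD []), pvNrm G.length (pvNeigh e) = j ∧ pvCost e ≥ mv

def pvReach (G : List (List (List Int))) (mv : Int) : Nat → Nat → Prop :=
  Relation.ReflTransGen (pvStep G mv)

def pvMono (u w : List Bool) : Prop :=
  w.length = u.length ∧ ∀ k, u.getD k false = true → w.getD k false = true

def pvClosed (G : List (List (List Int))) (mv : Int) (vis W : List Bool) : Prop :=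
  ∀ k j, W.getD k false = true → vis.getD k false = false → pvStep G mv k j →
    W.getD j false = true

-- the proofs are parameterized by a predicate R (instantiated with reachability from start)
-- that covers every node the runs can mark: R-nodes have well-formed edges and R is closed
-- under admissible steps
def pvWFOn (G : List (List (List Int))) (R : Nat → Prop) : Prop :=
  ∀ k, R k → ∀ e ∈ G[k]?.getD [], 2 ≤ e.length ∧ PySem.Raise.InRange G.length (e.headD 0)

def pvRClosed (G : List (List (List Int))) (mv : Int) (R : Nat → Prop) : Prop :=
  ∀ k j, R k → pvStep G mv k j → R j

def pvVisitSpec (G : List (List (List Int))) (mv : Int) (R : Nat → Prop) (fuel : Nat) : Prop :=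
  ∀ vis x, vis.length = G.length → vis.count false ≤ fuel →
    PySem.Raise.InRange G.length x → R (pvNrm G.length x) →
    PySem.List.pyGetD vis x true = false →
    pvMono vis (dfsVisitA G mv fuel vis x) ∧
    (dfsVisitA G mv fuel vis x).getD (pvNrm G.length x) false = true ∧
    (∀ k, (dfsVisitA G mv fuel vis x).getD k false = true →
      vis.getD k false = true ∨ pvReach G mv (pvNrm G.length x) k) ∧
    pvClosed G mv vis (dfsVisitA G mv fuel vis x)

def pvEdgesSpec (G : List (List (List Int))) (mv : Int) (R : Nat → Prop) (fuel : Nat) : Prop :=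
  ∀ es vis (a : Nat), vis.length = G.length → vis.count false ≤ fuel → a < G.length → R a →
    (∀ e ∈ es, e ∈ G[a]?.getD []) → vis.getD a false = true →
    pvMono vis (dfsEdgesA G mv fuel es vis) ∧
    (∀ k, (dfsEdgesA G mv fuel es vis).getD k false = true →
      vis.getD k false = true ∨ pvReach G mv a k) ∧
    pvClosed G mv vis (dfsEdgesA G mv fuel es vis) ∧
    (∀ e ∈ es, pvCost e ≥ mv →
      (dfsEdgesA G mv fuel es vis).getD (pvNrm G.length (pvNeigh e)) false = true)

theorem pvNeigh_eq_headD (e : List Int) : pvNeigh e = e.headD 0 := by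
  cases e with
  | nil => rfl
  | cons a t => simp [pvNeigh, PySem.List.pyGet?, PySem.List.pyIdx?]

theorem count_false_le_of_mono : ∀ (u w : List Bool), w.length = u.length →
    (∀ k, u.getD k false = true → w.getD k false = true) → w.count false ≤ u.count false := by
  intro u
  induction u with
  | nil => intro w hl _; simp_all [List.length_eq_zero_iff.1 hl]
  | cons a t ih =>
    intro w hl hm
    cases w with
    | nil => simp at hl
    | cons b s =>
      have h0 := hm 0
      have ht := ih s (by simpa using hl) (fun k => by simpa using hm (k+1))
      simp only [List.getD_cons_zero] at h0
      simp only [List.count_cons]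
      cases a <;> cases b <;> simp_all <;> omega

theorem getD_replicate_false (n k : Nat) : (List.replicate n false).getD k false = false := by
  rcases lt_or_ge k n with h | h
  · rw [List.getD_eq_getElem _ _ (by simpa using h)]
    simp
  · rw [List.getD_eq_getElem?_getD, List.getElem?_eq_none (by simpa using h)]
    rfl

theorem getD_set_true (l : List Bool) (m k : Nat) (hm : m < l.length) :
    (l.set m true).getD k false = if k = m then true else l.getD k false := by
  rw [List.getD_eq_getElem?_getD, List.getD_eq_getElem?_getD, List.getElem?_set]
  rcases eq_or_ne k m with rfl | hne
  · simp [hm]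
  · simp [hne, Ne.symm hne]

theorem getD_default_irrel (l : List Bool) (k : Nat) (hk : k < l.length) (d d' : Bool) :
    l.getD k d = l.getD k d' := by
  rw [List.getD_eq_getElem _ _ hk, List.getD_eq_getElem _ _ hk]

theorem pvMono_trans {u v w : List Bool} (h1 : pvMono u v) (h2 : pvMono v w) : pvMono u w :=
  ⟨h2.1.trans h1.1, fun k hk => h2.2 k (h1.2 k hk)⟩

theorem pvVisitSpec_zero (G : List (List (List Int))) (mv : Int) (R : Nat → Prop) :
    pvVisitSpec G mv R 0 := by
  intro vis x hlen hcount hx _ hxv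
  have hin := pyGetD_false_inrange vis x hxv
  have hk := pvNrm_lt vis.length x hin
  rw [pyGetD_inrange _ _ _ hin, List.getD_eq_getElem _ _ hk] at hxv
  have hmem : false ∈ vis := by rw [← hxv]; exact List.getElem_mem hk
  have := List.count_pos_iff.2 hmem
  omega

theorem pvEdges_of_visit (G : List (List (List Int))) (mv : Int) (R : Nat → Prop) (fuel : Nat)
    (HR1 : pvWFOn G R) (HR2 : pvRClosed G mv R) (hv : pvVisitSpec G mv R fuel) :
    pvEdgesSpec G mv R fuel := by
  intro es
  induction es with
  | nil =>
    intro vis a hlen hcount ha hRa hsub hatrue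
    rw [dfsEdgesA]
    refine ⟨⟨rfl, fun _ h => h⟩, fun k h => Or.inl h, ?_, ?_⟩
    · intro k j h1 h2 _
      rw [h1] at h2; cases h2
    · intro e he; cases he
  | cons e rest ih =>
    intro vis a hlen hcount ha hRa hsub hatrue
    have herow : e ∈ G[a]?.getD [] := hsub e (by simp)
    have hwf := HR1 a hRa e herow
    have hnin : PySem.Raise.InRange G.length (pvNeigh e) := by
      rw [pvNeigh_eq_headD]; exact hwf.2
    have hninv : PySem.Raise.InRange vis.length (pvNeigh e) := by rwa [hlen]
    have hnk : pvNrm G.length (pvNeigh e) < G.length := pvNrm_lt _ _ hnin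
    rw [dfsEdgesA]
    by_cases hc : PySem.List.pyGetD vis (pvNeigh e) true = false ∧ pvCost e ≥ mv
    · -- edge taken: a recursive DFS visit of the neighbour, then the rest of the edges
      rw [if_pos hc]
      have hRn : R (pvNrm G.length (pvNeigh e)) := HR2 a _ hRa ⟨e, herow, rfl, hc.2⟩
      obtain ⟨m1, t1, u1, c1⟩ := hv vis (pvNeigh e) hlen hcount hnin hRn hc.1
      set v' := dfsVisitA G mv fuel vis (pvNeigh e) with hv'def
      have hlen' : v'.length = G.length := m1.1.trans hlen
      have hcount' : v'.count false ≤ fuel :=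
        le_trans (count_false_le_of_mono vis v' m1.1 m1.2) hcount
      obtain ⟨m2, u2, c2, e2⟩ := ih v' a hlen' hcount' ha hRa
        (fun e' he' => hsub e' (by simp [he'])) (m1.2 a hatrue)
      have hstep : pvStep G mv a (pvNrm G.length (pvNeigh e)) := ⟨e, herow, rfl, hc.2⟩
      refine ⟨pvMono_trans m1 m2, ?_, ?_, ?_⟩
      · intro k hk
        rcases u2 k hk with hk' | hr
        · rcases u1 k hk' with hk'' | hr'
          · exact Or.inl hk''
          · exact Or.inr (Relation.ReflTransGen.head hstep hr')
        · exact Or.inr hr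
      · intro k j hW hvis hst
        by_cases hvk : v'.getD k false = true
        · exact m2.2 _ (c1 k j hvk hvis hst)
        · exact c2 k j hW (Bool.eq_false_iff.2 hvk) hst
      · intro e' he' hcost
        rcases List.mem_cons.1 he' with rfl | hmem
        · exact m2.2 _ t1
        · exact e2 e' hmem hcost
    · rw [if_neg hc]
      obtain ⟨m1, u1, c1, e1⟩ := ih vis a hlen hcount ha hRa
        (fun e' he' => hsub e' (by simp [he'])) hatrue
      refine ⟨m1, u1, c1, ?_⟩
      intro e' he' hcost
      rcases List.mem_cons.1 he' with rfl | hmem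
      · -- this edge was skipped, so its neighbour is already visited
        have hvtrue : PySem.List.pyGetD vis (pvNeigh e') true = true := by
          rcases Bool.eq_false_or_eq_true (PySem.List.pyGetD vis (pvNeigh e') true) with h | h
          · exact h
          · exact absurd ⟨h, hcost⟩ hc
        apply m1.2
        rw [pyGetD_inrange _ _ _ hninv] at hvtrue
        rw [hlen] at hvtrue
        rwa [getD_default_irrel _ _ (by rw [hlen]; exact hnk) false true]
      · exact e1 e' hmem hcost

theorem pvVisit_succ (G : List (List (List Int))) (mv : Int) (R : Nat → Prop) (fuel : Nat)
    (he : pvEdgesSpec G mv R fuel) : pvVisitSpec G mv R (fuel + 1) := by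
  intro vis x hlen hcount hx hRx hxv
  have hin : PySem.Raise.InRange vis.length x := pyGetD_false_inrange vis x hxv
  set k₀ := pvNrm G.length x with hk₀def
  have hkx : k₀ < G.length := pvNrm_lt _ _ hx
  have hkxv : k₀ < vis.length := by rw [hlen]; exact hkx
  have hnrm_eq : pvNrm vis.length x = k₀ := by rw [hlen]
  have hvis1 : PySem.List.pySetD vis x true = vis.set k₀ true := by
    rw [pySetD_inrange _ _ _ hin, hnrm_eq]
  have hrow : (PySem.List.pyGet? G x).getD [] = G[k₀]?.getD [] := by
    rw [pyGet?_inrange _ _ hx]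
  have hxfalse : vis.getD k₀ false = false := by
    rw [pyGetD_inrange _ _ _ hin, hnrm_eq] at hxv
    rwa [getD_default_irrel _ _ hkxv false true]
  rw [dfsVisitA, hvis1, hrow]
  have hmono1 : pvMono vis (vis.set k₀ true) := by
    refine ⟨by simp, fun k hk => ?_⟩
    rw [getD_set_true _ _ _ hkxv]
    split_ifs <;> simp_all
  have hcount1 : (vis.set k₀ true).count false ≤ fuel := by
    have hlt := count_false_set_lt vis k₀ hkxv (by
      rw [List.getD_eq_getElem _ _ hkxv] at hxfalse; exact hxfalse)
    omega
  obtain ⟨m2, u2, c2, e2⟩ := he (G[k₀]?.getD []) (vis.set k₀ true) k₀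
    (by simp [hlen]) hcount1 hkx hRx (fun _ h => h)
    (by rw [getD_set_true _ _ _ hkxv]; simp)
  refine ⟨pvMono_trans hmono1 m2, ?_, ?_, ?_⟩
  · exact m2.2 _ (by rw [getD_set_true _ _ _ hkxv]; simp)
  · intro k hk
    rcases u2 k hk with hk' | hr
    · rw [getD_set_true _ _ _ hkxv] at hk'
      by_cases hkk : k = k₀
      · exact Or.inr (hkk ▸ Relation.ReflTransGen.refl)
      · rw [if_neg hkk] at hk'; exact Or.inl hk'
    · exact Or.inr hr
  · intro k j hW hvis hst
    by_cases hkk : k = k₀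
    · subst hkk
      obtain ⟨e, he', hnrm, hcost⟩ := hst
      rw [← hnrm]
      exact e2 e he' hcost
    · apply c2 k j hW _ hst
      rw [getD_set_true _ _ _ hkxv, if_neg hkk]
      exact hvis

theorem pvVisitSpec_all (G : List (List (List Int))) (mv : Int) (R : Nat → Prop)
    (HR1 : pvWFOn G R) (HR2 : pvRClosed G mv R) : ∀ fuel, pvVisitSpec G mv R fuel := by
  intro fuel
  induction fuel with
  | zero => exact pvVisitSpec_zero G mv R
  | succ f ih => exact pvVisit_succ G mv R f (pvEdges_of_visit G mv R f HR1 HR2 ih)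

-- membership in the push fold of B's inner loop
theorem mem_pushFold (P : List Int → Prop) [DecidablePred P] :
    ∀ (l : List (List Int)) (st : List Int) (j : Int),
    (j ∈ l.foldl (fun st e => if P e then pvNeigh e :: st else st) st ↔
      j ∈ st ∨ ∃ e ∈ l, P e ∧ j = pvNeigh e) := by
  intro l
  induction l with
  | nil => simp
  | cons e t ih =>
    intro st j
    simp only [List.foldl_cons]
    rw [ih]
    by_cases h : P e
    · rw [if_pos h]
      constructor
      · rintro (hm | hm)
        · rcases List.mem_cons.1 hm with rfl | hm'
          · exact Or.inr ⟨e, by simp, h, rfl⟩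
          · exact Or.inl hm'
        · obtain ⟨e', he', hp, rfl⟩ := hm
          exact Or.inr ⟨e', by simp [he'], hp, rfl⟩
      · rintro (hm | ⟨e', he', hp, rfl⟩)
        · exact Or.inl (by simp [hm])
        · rcases List.mem_cons.1 he' with rfl | hm'
          · exact Or.inl (by simp)
          · exact Or.inr ⟨e', hm', hp, rfl⟩
    · rw [if_neg h]
      constructor
      · rintro (hm | ⟨e', he', hp, rfl⟩)
        · exact Or.inl hm
        · exact Or.inr ⟨e', by simp [he'], hp, rfl⟩
      · rintro (hm | ⟨e', he', hp, rfl⟩)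
        · exact Or.inl hm
        · rcases List.mem_cons.1 he' with rfl | hm'
          · exact absurd hp h
          · exact Or.inr ⟨e', hm', hp, rfl⟩

theorem pvLoopB_spec (G : List (List (List Int))) (mv : Int) (R : Nat → Prop)
    (HR1 : pvWFOn G R) (HR2 : pvRClosed G mv R) :
    ∀ vis stack, vis.length = G.length →
    (∀ s ∈ stack, PySem.Raise.InRange G.length s ∧ R (pvNrm G.length s)) →
    pvMono vis (dfsLoopB G mv vis stack) ∧
    (∀ s ∈ stack, (dfsLoopB G mv vis stack).getD (pvNrm G.length s) false = true) ∧
    (∀ k, (dfsLoopB G mv vis stack).getD k false = true →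
      vis.getD k false = true ∨ ∃ s ∈ stack, pvReach G mv (pvNrm G.length s) k) ∧
    pvClosed G mv vis (dfsLoopB G mv vis stack) := by
  intro vis stack
  induction vis, stack using dfsLoopB.induct G mv with
  | case1 vis =>
    intro hlen _
    rw [dfsLoopB]
    refine ⟨⟨rfl, fun _ h => h⟩, by simp, fun k h => Or.inl h, ?_⟩
    intro k j h1 h2 _
    rw [h1] at h2; cases h2
  | case2 vis x rest h ih =>
    intro hlen hst
    rw [dfsLoopB, dif_pos h]
    have hxin : PySem.Raise.InRange G.length x := (hst x (by simp)).1
    have hxinv : PySem.Raise.InRange vis.length x := by rwa [hlen]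
    obtain ⟨m1, q1, u1, c1⟩ := ih hlen (fun s hs => hst s (by simp [hs]))
    refine ⟨m1, ?_, ?_, c1⟩
    · intro s hs
      rcases List.mem_cons.1 hs with rfl | hs'
      · apply m1.2
        rw [pyGetD_inrange _ _ _ hxinv] at h
        rw [hlen] at h
        rwa [getD_default_irrel _ _ (by rw [hlen]; exact pvNrm_lt _ _ hxin) false true]
      · exact q1 s hs'
    · intro k hk
      rcases u1 k hk with h' | ⟨s, hs, hr⟩
      · exact Or.inl h'
      · exact Or.inr ⟨s, by simp [hs], hr⟩
  | case3 vis x rest h vis' ih =>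
    intro hlen hst
    have hvis'_def : vis' = PySem.List.pySetD vis x true := rfl
    have hxfalse : PySem.List.pyGetD vis x true = false := by simpa using h
    have hin : PySem.Raise.InRange vis.length x := pyGetD_false_inrange vis x hxfalse
    have hxin : PySem.Raise.InRange G.length x := by rwa [hlen] at hin
    set k₀ := pvNrm G.length x with hk₀def
    have hkx : k₀ < G.length := pvNrm_lt _ _ hxin
    have hkxv : k₀ < vis.length := by rw [hlen]; exact hkx
    have hnrm_eq : pvNrm vis.length x = k₀ := by rw [hlen]
    have hvis'eq : vis' = vis.set k₀ true := by
      rw [hvis'_def, pySetD_inrange _ _ _ hin, hnrm_eq]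
    have hlen' : vis'.length = G.length := by rw [hvis'eq]; simp [hlen]
    have hrow : (PySem.List.pyGet? G x).getD [] = G[k₀]?.getD [] := by
      rw [pyGet?_inrange _ _ hxin]
    have hRk₀ : R k₀ := (hst x (by simp)).2
    rw [dfsLoopB, dif_neg h]
    simp only []
    set stack' := (((PySem.List.pyGet? G x).getD []).reverse.foldl
      (fun st e => if PySem.List.pyGetD vis' (pvNeigh e) true = false ∧ pvCost e ≥ mv
                   then pvNeigh e :: st else st) rest) with hstack'_def
    have hmemstack' : ∀ j, j ∈ stack' ↔ j ∈ rest ∨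
        ∃ e ∈ (G[k₀]?.getD []).reverse,
          (PySem.List.pyGetD vis' (pvNeigh e) true = false ∧ pvCost e ≥ mv) ∧ j = pvNeigh e := by
      intro j
      rw [hstack'_def, hrow]
      exact mem_pushFold _ _ _ _
    have hst' : ∀ s ∈ stack', PySem.Raise.InRange G.length s ∧ R (pvNrm G.length s) := by
      intro s hs
      rcases (hmemstack' s).1 hs with hs' | ⟨e, he, hcond, rfl⟩
      · exact hst s (by simp [hs'])
      · have hmem := List.mem_reverse.1 he
        constructor
        · have := (HR1 k₀ hRk₀ e hmem).2
          rwa [pvNeigh_eq_headD]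
        · exact HR2 k₀ _ hRk₀ ⟨e, hmem, rfl, hcond.2⟩
    obtain ⟨m2, q2, u2, c2⟩ := ih hlen' hst'
    have hmono1 : pvMono vis vis' := by
      rw [hvis'eq]
      refine ⟨by simp, fun k hk => ?_⟩
      rw [getD_set_true _ _ _ hkxv]
      split_ifs <;> simp_all
    have hvis'k₀ : vis'.getD k₀ false = true := by
      rw [hvis'eq, getD_set_true _ _ _ hkxv]; simp
    refine ⟨pvMono_trans hmono1 m2, ?_, ?_, ?_⟩
    · intro s hs
      rcases List.mem_cons.1 hs with rfl | hs'
      · exact m2.2 _ hvis'k₀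
      · exact q2 s ((hmemstack' s).2 (Or.inl hs'))
    · intro k hk
      rcases u2 k hk with hk' | ⟨s, hs, hr⟩
      · rw [hvis'eq, getD_set_true _ _ _ hkxv] at hk'
        by_cases hkk : k = k₀
        · exact Or.inr ⟨x, by simp, hkk ▸ Relation.ReflTransGen.refl⟩
        · rw [if_neg hkk] at hk'; exact Or.inl hk'
      · rcases (hmemstack' s).1 hs with hs' | ⟨e, he, hcond, rfl⟩
        · exact Or.inr ⟨s, by simp [hs'], hr⟩
        · have hstep : pvStep G mv k₀ (pvNrm G.length (pvNeigh e)) :=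
            ⟨e, List.mem_reverse.1 he, rfl, hcond.2⟩
          exact Or.inr ⟨x, by simp, Relation.ReflTransGen.head hstep hr⟩
    · intro k j hW hvis hstep
      by_cases hkk : k = k₀
      · subst hkk
        obtain ⟨e, he', hnrm, hcost⟩ := hstep
        rw [← hnrm]
        have hnin : PySem.Raise.InRange G.length (pvNeigh e) := by
          rw [pvNeigh_eq_headD]; exact (HR1 k₀ hRk₀ e he').2
        by_cases hcond : PySem.List.pyGetD vis' (pvNeigh e) true = false
        · apply q2
          exact (hmemstack' (pvNeigh e)).2
            (Or.inr ⟨e, List.mem_reverse.2 he', ⟨hcond, hcost⟩, rfl⟩)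
        · have htrue : PySem.List.pyGetD vis' (pvNeigh e) true = true := by
            rcases Bool.eq_false_or_eq_true (PySem.List.pyGetD vis' (pvNeigh e) true) with h' | h'
            · exact h'
            · exact absurd h' hcond
          have hninv' : PySem.Raise.InRange vis'.length (pvNeigh e) := by rwa [hlen']
          rw [pyGetD_inrange _ _ _ hninv'] at htrue
          apply m2.2
          rw [hlen'] at htrue
          rwa [getD_default_irrel _ _ (by rw [hlen']; exact pvNrm_lt _ _ hnin) false true]
      · apply c2 k j hW _ hstep
        rw [hvis'eq, getD_set_true _ _ _ hkxv, if_neg hkk]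
        exact hvis

theorem pvReach_marked (G : List (List (List Int))) (mv : Int) (W : List Bool) (r : Nat)
    (hsrc : W.getD r false = true)
    (hcl : pvClosed G mv (List.replicate G.length false) W) :
    ∀ k, pvReach G mv r k → W.getD k false = true := by
  intro k h
  induction h with
  | refl => exact hsrc
  | tail _ hbc ih => exact hcl _ _ ih (getD_replicate_false _ _) hbc

-- correctness of the computed closure pvReachList: it contains start, and is closed under
-- the admissible well-formed neighbour step
theorem mem_pvGrow (G : List (List (List Int))) (mv : Int) (S : List Nat) (x : Nat) :
    x ∈ pvGrow G mv S ↔ x ∈ S ∨ ∃ k ∈ S, x ∈ pvSuccsW G mv k := by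
  simp [pvGrow, List.mem_dedup, List.mem_flatMap]

theorem pvGrow_mono (G : List (List (List Int))) (mv : Int) (S T : List Nat) (h : S ⊆ T) :
    pvGrow G mv S ⊆ pvGrow G mv T := by
  intro x hx
  rw [mem_pvGrow] at hx ⊢
  rcases hx with hx | ⟨k, hk, hx⟩
  · exact Or.inl (h hx)
  · exact Or.inr ⟨k, h hk, hx⟩

theorem pvSuccsW_lt (G : List (List (List Int))) (mv : Int) (k j : Nat)
    (h : j ∈ pvSuccsW G mv k) : j < G.length := by
  simp only [pvSuccsW, List.mem_map, List.mem_filter] at h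
  obtain ⟨e, ⟨_, hok⟩, rfl⟩ := h
  simp only [pvEdgeOK, Bool.and_eq_true, decide_eq_true_eq] at hok
  rw [pvNeigh_eq_headD]
  exact pvNrm_lt _ _ hok.1.2

theorem pvReachList_spec (G : List (List (List Int))) (mv : Int) (start : Int)
    (h : PySem.Raise.InRange G.length start) :
    pvNrm G.length start ∈ pvReachList G mv start ∧
    ∀ k ∈ pvReachList G mv start, ∀ j ∈ pvSuccsW G mv k, j ∈ pvReachList G mv start := by
  have hn : 0 < G.length := by
    rcases h with ⟨h1, h2⟩
    omega
  set f := pvGrow G mv with hf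
  set S : Nat → List Nat := fun i => f^[i] [pvNrm G.length start] with hS
  have hSsucc : ∀ i, S (i+1) = f (S i) := fun i => Function.iterate_succ_apply' f i _
  have hsub : ∀ i, S i ⊆ S (i+1) := by
    intro i x hx
    rw [hSsucc, hf, mem_pvGrow]
    exact Or.inl hx
  have hchain : ∀ i j, i ≤ j → S i ⊆ S j := by
    intro i j hij
    induction j, hij using Nat.le_induction with
    | base => exact fun _ h => h
    | succ j _ ih => exact fun x hx => hsub j (ih hx)
  have hnodup : ∀ i, (S i).Nodup := by
    intro i
    cases i with
    | zero => simp [hS]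
    | succ i => rw [hSsucc, hf]; simp only [pvGrow]; exact List.nodup_dedup _
  have hlt : ∀ i, ∀ x ∈ S i, x < G.length := by
    intro i
    induction i with
    | zero =>
      intro x hx
      simp only [hS, Function.iterate_zero_apply, List.mem_singleton] at hx
      subst hx
      exact pvNrm_lt _ _ h
    | succ i ih =>
      intro x hx
      rw [hSsucc, hf, mem_pvGrow] at hx
      rcases hx with hx | ⟨k, _, hx⟩
      · exact ih x hx
      · exact pvSuccsW_lt G mv k x hx
  have hlenle : ∀ i, (S i).length ≤ G.length := by
    intro i
    have hcard : (S i).toFinset.card = (S i).length := List.toFinset_card_of_nodup (hnodup i)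
    have hsubr : (S i).toFinset ⊆ Finset.range G.length := by
      intro x hx
      rw [List.mem_toFinset] at hx
      rw [Finset.mem_range]
      exact hlt i x hx
    have := Finset.card_le_card hsubr
    rw [hcard, Finset.card_range] at this
    exact this
  have hsat : ∃ i < G.length, S (i+1) ⊆ S i := by
    by_contra hcon
    push_neg at hcon
    have hgrow : ∀ i ≤ G.length, i + 1 ≤ (S i).length := by
      intro i hi
      induction i with
      | zero => simp [hS]
      | succ i ih =>
        have hi' : i ≤ G.length := by omega
        have h1 := ih hi'
        have hni := hcon i (by omega)
        have hex : ∃ x ∈ S (i+1), x ∉ S i := by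
          by_contra hno
          push_neg at hno
          exact hni (fun x hx => hno x hx)
        obtain ⟨x, hx1, hx2⟩ := hex
        have hss : (S i).toFinset ⊂ (S (i+1)).toFinset := by
          constructor
          · intro y hy
            rw [List.mem_toFinset] at hy ⊢
            exact hsub i hy
          · intro hcontra
            exact hx2 (List.mem_toFinset.1 (hcontra (List.mem_toFinset.2 hx1)))
        have hlt' := Finset.card_lt_card hss
        rw [List.toFinset_card_of_nodup (hnodup i),
          List.toFinset_card_of_nodup (hnodup (i+1))] at hlt'
        omega
    have := hgrow G.length le_rfl
    have := hlenle G.length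
    omega
  obtain ⟨i, hilt, hisat⟩ := hsat
  have hfix : ∀ j, i ≤ j → S j ⊆ S i := by
    intro j hij
    induction j, hij using Nat.le_induction with
    | base => exact fun _ h => h
    | succ j _ ih =>
      intro x hx
      rw [hSsucc] at hx
      have : x ∈ f (S i) := pvGrow_mono G mv _ _ ih hx
      rw [← hSsucc] at this
      exact hisat this
  constructor
  · exact hchain 0 G.length (by omega) (by simp [hS, Function.iterate_zero_apply])
  · intro k hk j hj
    have hki : k ∈ S i := hfix G.length (by omega) hk
    have : j ∈ f (S i) := by
      rw [hf, mem_pvGrow]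
      exact Or.inr ⟨k, hki, hj⟩
    rw [← hSsucc] at this
    exact hchain i G.length (by omega) (hisat this)

theorem mem_pvSuccsW (G : List (List (List Int))) (mv : Int) (k j : Nat) :
    j ∈ pvSuccsW G mv k ↔ ∃ e ∈ G[k]?.getD [], pvEdgeOK G mv e = true ∧
      j = pvNrm G.length (pvNeigh e) := by
  simp [pvSuccsW, List.mem_map, List.mem_filter]
  tauto

-- ===== VERDICT (by name: the statement is the Claim_ definition above) =====
theorem dfs_spec : Claim_equal_dfs := by
  intro G mv start end_ _ hpre
  obtain ⟨hs, _, hWF⟩ := hpre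
  obtain ⟨hsmem, hclosed⟩ := pvReachList_spec G mv start hs
  -- every node reachable along admissible steps is in the computed closure, hence well-formed
  have hcomplete : ∀ k, pvReach G mv (pvNrm G.length start) k → k ∈ pvReachList G mv start := by
    intro k hk
    induction hk with
    | refl => exact hsmem
    | tail hab hbc ih =>
      obtain ⟨e, he, hnrm, hcost⟩ := hbc
      have hwf := hWF _ ih e he
      apply hclosed _ ih
      rw [mem_pvSuccsW]
      refine ⟨e, he, ?_, hnrm.symm⟩
      simp only [pvEdgeOK, Bool.and_eq_true, decide_eq_true_eq]
      exact ⟨⟨hwf.1, hwf.2⟩, hcost⟩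
  have HR1 : pvWFOn G (pvReach G mv (pvNrm G.length start)) :=
    fun k hk => hWF k (hcomplete k hk)
  have HR2 : pvRClosed G mv (pvReach G mv (pvNrm G.length start)) :=
    fun k j hk hstep => Relation.ReflTransGen.tail hk hstep
  unfold Spec_dfs dfs dfs_alt
  simp only []
  suffices hWeq : dfsVisitA G mv (G.length + 1) (List.replicate G.length false) start =
      dfsLoopB G mv (List.replicate G.length false) [start] by rw [hWeq]
  have hlen0 : (List.replicate G.length false).length = G.length := by simp
  have hkl : pvNrm G.length start < G.length := pvNrm_lt _ _ hs
  have hxv : PySem.List.pyGetD (List.replicate G.length false) start true = false := by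
    have hin : PySem.Raise.InRange (List.replicate G.length false).length start := by
      rwa [hlen0]
    rw [pyGetD_inrange _ _ _ hin, hlen0,
      getD_default_irrel _ _ (by rw [hlen0]; exact hkl) true false]
    exact getD_replicate_false _ _
  obtain ⟨mA, tA, uA, cA⟩ := pvVisitSpec_all G mv _ HR1 HR2 (G.length + 1)
    (List.replicate G.length false) start hlen0 (by simp) hs Relation.ReflTransGen.refl hxv
  obtain ⟨mB, qB, uB, cB⟩ := pvLoopB_spec G mv _ HR1 HR2 (List.replicate G.length false)
    [start] hlen0
    (by intro s hs'; rw [List.mem_singleton] at hs'; subst hs'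
        exact ⟨hs, Relation.ReflTransGen.refl⟩)
  set WA := dfsVisitA G mv (G.length + 1) (List.replicate G.length false) start with hWA
  set WB := dfsLoopB G mv (List.replicate G.length false) [start] with hWB
  have hiffA : ∀ k, (WA.getD k false = true ↔ pvReach G mv (pvNrm G.length start) k) := by
    intro k
    constructor
    · intro hk
      rcases uA k hk with h' | h'
      · rw [getD_replicate_false] at h'; cases h'
      · exact h'
    · exact pvReach_marked G mv WA _ tA cA k
  have hiffB : ∀ k, (WB.getD k false = true ↔ pvReach G mv (pvNrm G.length start) k) := by
    intro k
    constructor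
    · intro hk
      rcases uB k hk with h' | ⟨s, hs', hr⟩
      · rw [getD_replicate_false] at h'; cases h'
      · rw [List.mem_singleton] at hs'; subst hs'; exact hr
    · exact pvReach_marked G mv WB _ (qB start (List.mem_singleton.2 rfl)) cB k
  apply List.ext_getElem (by rw [mA.1, mB.1])
  intro k h1 h2
  have e1 : WA.getD k false = WA[k] := List.getD_eq_getElem _ _ h1
  have e2 : WB.getD k false = WB[k] := List.getD_eq_getElem _ _ h2
  have hik : (WA[k] = true) ↔ (WB[k] = true) := by
    rw [← e1, ← e2]
    exact (hiffA k).trans (hiffB k).symm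
  cases hA : WA[k] <;> cases hB : WB[k] <;> simp_all
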